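-- pv_equiv track=rewrite | github.com/cosinusalpha/webctl | src/webctl/daemon/adblock/cosmetic.py | _domain_matches
-- ===== SOURCE A (Python) =====
-- def _get_hostname_variants(hostname: str) -> list[str]:
--     """Get all variants of a hostname for matching.
--
--     For 'sub.example.com', returns ['sub.example.com', 'example.com', 'com'].
--     """
--     parts = hostname.split(".")
--     variants = []
--     for i in range(len(parts)):
--         variants.append(".".join(parts[i:]))
--     return variants
--
-- def _domain_matches(hostname: str, included: set[str], excluded: set[str]) -> bool:
--     """Check if hostname matches domain constraints."""
--     hostname = hostname.lower()
--     hostname_variants = _get_hostname_variants(hostname)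
--
--     # Check exclusions first
--     for variant in hostname_variants:
--         if variant in excluded:
--             return False
--
--     # If no inclusions specified, matches
--     if not included:
--         return True
--
--     # Check inclusions
--     return any(variant in included for variant in hostname_variants)
-- ===== SOURCE B (Python) =====
-- def _domain_matches(hostname: str, included: set[str], excluded: set[str]) -> bool:
--     """Check if hostname matches domain constraints."""
--     current = hostname.lower()
--     found_include = False
--     while True:
--         if current in excluded:
--             return False
--         if included and current in included:
--             found_include = True
--         idx = current.find(".")
--         if idx == -1:
--             break
--         current = current[idx + 1:]
--     return True if not included else found_include
-- ===== Notes on version B (the rewrite author's own statement) =====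
-- stated objective: simpler
-- what changed: Replaces the split/join variant-list builder and the two separate scans (exclusion scan, then inclusion scan) with one fused pass that walks the suffix chain in place by slicing after the first dot, returning False immediately on an excluded suffix and accumulating an include flag.
import Mathlib
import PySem

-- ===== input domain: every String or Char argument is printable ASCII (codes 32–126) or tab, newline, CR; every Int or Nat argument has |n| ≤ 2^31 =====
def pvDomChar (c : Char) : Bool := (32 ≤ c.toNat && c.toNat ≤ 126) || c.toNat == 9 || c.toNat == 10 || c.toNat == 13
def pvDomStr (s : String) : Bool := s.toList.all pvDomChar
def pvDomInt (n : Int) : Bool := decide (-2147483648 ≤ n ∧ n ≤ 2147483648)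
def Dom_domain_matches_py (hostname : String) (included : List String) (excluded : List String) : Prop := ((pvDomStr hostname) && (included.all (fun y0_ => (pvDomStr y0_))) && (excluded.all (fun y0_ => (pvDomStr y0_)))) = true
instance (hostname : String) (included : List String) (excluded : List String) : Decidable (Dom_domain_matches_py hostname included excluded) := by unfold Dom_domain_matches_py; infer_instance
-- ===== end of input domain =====

-- B replaces A's variant-list builder and its two separate scans by one fused pass that
-- slices the hostname after the first '.' step by step (objective: simpler; return value only).

-- ===== PORT A =====
-- port of _get_hostname_variants: split on '.', then for i in range(len(parts)) append '.'.join(parts[i:])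
def get_hostname_variants (hostname : String) : List String :=
  let parts : List String := (PySem.Chars.splitOn hostname.toList ".".toList).map String.ofList
  let variants : List String :=
    (PySem.List.pyRange 0 (parts.length : Int) 1).foldl
      (fun acc i => acc ++ [PySem.Str.join "." (PySem.List.slice parts (some i) none)]) []
  variants

def domain_matches_py (hostname : String) (included : List String) (excluded : List String) : Bool :=
  let hostname := PySem.Str.lower hostname
  let hostname_variants := get_hostname_variants hostname
  -- for variant in hostname_variants: if variant in excluded: return False
  if hostname_variants.any (fun variant => excluded.contains variant) then false
  -- if not included: return True
  else if included.isEmpty then true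
  -- return any(variant in included for variant in hostname_variants)
  else hostname_variants.any (fun variant => included.contains variant)

-- ===== PORT B =====
-- the 'while True' loop of Source B; 'current' shrinks to its suffix after the first dot each turn
def domain_matches_loop (included excluded : List String) (current : String) (found_include : Bool) : Bool :=
  if excluded.contains current then false
  else
    let found_include := found_include || (!included.isEmpty && included.contains current)
    let idx := PySem.Str.find current "."
    if h : idx = -1 then
      if included.isEmpty then true else found_include
    else
      domain_matches_loop included excluded (PySem.Str.slice current (some (idx + 1)) none) found_include
termination_by current.toList.length
decreasing_by
  have h' : PySem.Str.find current "." ≠ -1 := h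
  have hinf : (".".toList) <:+: current.toList := (PySem.Str.find_ne_neg_one_iff current ".").mp h'
  have hlen : 0 < current.toList.length := by
    rcases hinf with ⟨l, r, hlr⟩
    have : current.toList.length = l.length + 1 + r.length := by rw [← hlr]; simp; omega
    omega
  have hpos : 0 ≤ PySem.Str.find current "." := by
    have hle := PySem.Chars.neg_one_le_find current.toList ".".toList
    rw [PySem.Str.find_eq] at h' ⊢; omega
  rw [PySem.Str.toList_slice, PySem.Chars.slice_eq_listSlice, PySem.List.slice_some_none,
      List.length_drop]
  simp only [PySem.List.clampIdx]
  split <;> omega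

def domain_matches_py_alt (hostname : String) (included : List String) (excluded : List String) : Bool :=
  domain_matches_loop included excluded (PySem.Str.lower hostname) false

-- ===== PRECONDITION & SPEC =====
def Spec_domain_matches_py (hostname : String) (included : List String) (excluded : List String) (out : Bool) : Prop := out = domain_matches_py_alt hostname included excluded
instance (hostname : String) (included : List String) (excluded : List String) (out : Bool) : Decidable (Spec_domain_matches_py hostname included excluded out) := by unfold Spec_domain_matches_py; infer_instance

-- ===== CLAIM (what is proved, stated in full; the proofs are below) =====
def Claim_equal_domain_matches_py : Prop := ∀ (hostname : String) (included : List String) (excluded : List String), Dom_domain_matches_py hostname included excluded → Spec_domain_matches_py hostname included excluded (domain_matches_py hostname included excluded)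

-- ===== LEMMAS AND PROOFS =====

-- the chain of '.'-suffixes of s: s itself, then everything after the first dot, and so on
def suffixChain (s : String) : List String :=
  s ::
    (if h : PySem.Str.find s "." = -1 then []
     else suffixChain (PySem.Str.slice s (some (PySem.Str.find s "." + 1)) none))
termination_by s.toList.length
decreasing_by
  have hinf : (".".toList) <:+: s.toList := (PySem.Str.find_ne_neg_one_iff s ".").mp h
  have hlen : 0 < s.toList.length := by
    rcases hinf with ⟨l, r, hlr⟩
    have : s.toList.length = l.length + 1 + r.length := by rw [← hlr]; simp; omega
    omega
  have hpos : 0 ≤ PySem.Str.find s "." := by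
    have hle := PySem.Chars.neg_one_le_find s.toList ".".toList
    rw [PySem.Str.find_eq] at h ⊢; omega
  rw [PySem.Str.toList_slice, PySem.Chars.slice_eq_listSlice, PySem.List.slice_some_none,
      List.length_drop]
  simp only [PySem.List.clampIdx]
  split <;> omega

-- structural counterpart of splitting a char list on '.'
def splitChain : List Char → List (List Char)
  | [] => [[]]
  | c :: rest =>
    match splitChain rest with
    | [] => []
    | p :: ps => if c = '.' then [] :: p :: ps else (c :: p) :: ps

theorem splitChain_ne_nil (cs : List Char) : splitChain cs ≠ [] := by
  induction cs with
  | nil => simp [splitChain]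
  | cons c rest ih =>
    simp only [splitChain]
    cases hrec : splitChain rest with
    | nil => exact absurd hrec ih
    | cons p ps => dsimp only; split <;> simp

-- prepend chars to the head piece of a split
def consHead (pre : List Char) : List (List Char) → List (List Char)
  | [] => []
  | p :: ps => (pre ++ p) :: ps

theorem splitOn_go_eq (fuel : Nat) (l cur : List Char) (acc : List (List Char))
    (hf : l.length ≤ fuel) :
    PySem.Chars.splitOn.go ['.'] fuel l cur acc =
      acc.reverse ++ consHead cur.reverse (splitChain l) := by
  induction fuel generalizing l cur acc with
  | zero =>
    have : l = [] := by cases l <;> simp_all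
    subst this
    simp [PySem.Chars.splitOn.go, splitChain, consHead]
  | succ f ih =>
    cases l with
    | nil => simp [PySem.Chars.splitOn.go, splitChain, consHead]
    | cons c rest =>
      by_cases hc : c = '.'
      · subst hc
        rw [show PySem.Chars.splitOn.go ['.'] (f+1) ('.' :: rest) cur acc
              = PySem.Chars.splitOn.go ['.'] f rest [] (cur.reverse :: acc) by
            simp [PySem.Chars.splitOn.go, List.isPrefixOf]]
        rw [ih rest [] (cur.reverse :: acc) (by simpa using Nat.lt_succ_iff.mp (by simpa using hf))]
        simp only [splitChain]
        cases hrec : splitChain rest with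
        | nil => exact absurd hrec (splitChain_ne_nil rest)
        | cons p ps => simp [consHead]
      · rw [show PySem.Chars.splitOn.go ['.'] (f+1) (c :: rest) cur acc
              = PySem.Chars.splitOn.go ['.'] f rest (c :: cur) acc by
            have hb : ('.' == c) = false := by simp [Ne.symm hc]
            simp [PySem.Chars.splitOn.go, List.isPrefixOf, hb]]
        rw [ih rest (c :: cur) acc (by simpa using Nat.lt_succ_iff.mp (by simpa using hf))]
        simp only [splitChain]
        cases hrec : splitChain rest with
        | nil => exact absurd hrec (splitChain_ne_nil rest)
        | cons p ps =>
          simp [consHead, hc]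

theorem splitOn_eq (cs : List Char) : PySem.Chars.splitOn cs ['.'] = splitChain cs := by
  rw [PySem.Chars.splitOn, splitOn_go_eq cs.length.succ cs [] [] (by omega)]
  cases hrec : splitChain cs with
  | nil => exact absurd hrec (splitChain_ne_nil cs)
  | cons p ps => simp [consHead]

theorem find_go_cons (c : Char) (t : List Char) (k : Nat) :
    PySem.Chars.find.go ['.'] (c :: t) k =
      if c = '.' then (k : Int) else PySem.Chars.find.go ['.'] t (k + 1) := by
  by_cases hc : c = '.'
  · subst hc; simp [PySem.Chars.find.go, List.isPrefixOf]
  · have hb : ('.' == c) = false := by simp [Ne.symm hc]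
    simp [PySem.Chars.find.go, List.isPrefixOf, hb, hc]

theorem find_go_shift (l : List Char) (k : Nat) :
    PySem.Chars.find.go ['.'] l k =
      if PySem.Chars.find.go ['.'] l 0 = -1 then -1 else PySem.Chars.find.go ['.'] l 0 + k := by
  induction l generalizing k with
  | nil => simp [PySem.Chars.find.go]
  | cons c t ih =>
    rw [find_go_cons, find_go_cons]
    by_cases hc : c = '.'
    · simp [hc]
    · simp only [hc, if_false]
      rw [ih (k+1), ih 1]
      by_cases h0 : PySem.Chars.find.go ['.'] t 0 = -1
      · simp [h0]
      · simp only [h0, if_false]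
        have hge := PySem.Chars.neg_one_le_find t ['.']
        simp only [PySem.Chars.find] at hge
        push_cast
        split_ifs <;> omega

theorem find_dot_cons (c : Char) (t : List Char) :
    PySem.Chars.find (c :: t) ['.'] =
      if c = '.' then 0
      else if PySem.Chars.find t ['.'] = -1 then -1 else PySem.Chars.find t ['.'] + 1 := by
  simp only [PySem.Chars.find]
  rw [find_go_cons]
  by_cases hc : c = '.'
  · simp [hc]
  · simp only [hc, if_false]
    rw [find_go_shift]
    norm_num

theorem find_dot_nil : PySem.Chars.find [] ['.'] = -1 := by
  simp [PySem.Chars.find, PySem.Chars.find.go]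

theorem splitChain_no_dot (cs : List Char) (h : PySem.Chars.find cs ['.'] = -1) :
    splitChain cs = [cs] := by
  induction cs with
  | nil => simp [splitChain]
  | cons c rest ih =>
    rw [find_dot_cons] at h
    have hge := PySem.Chars.neg_one_le_find rest ['.']
    by_cases hc : c = '.'
    · simp [hc] at h
    · simp only [hc, if_false] at h
      by_cases h0 : PySem.Chars.find rest ['.'] = -1
      · simp [splitChain, ih h0, hc]
      · rw [if_neg h0] at h
        omega

theorem splitChain_dot (cs : List Char) (n : Nat) (h : PySem.Chars.find cs ['.'] = (n : Int)) :
    splitChain cs = cs.take n :: splitChain (cs.drop (n + 1)) := by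
  induction cs generalizing n with
  | nil =>
    rw [find_dot_nil] at h
    omega
  | cons c rest ih =>
    rw [find_dot_cons] at h
    by_cases hc : c = '.'
    · rw [if_pos hc] at h
      have hn : n = 0 := by omega
      subst hn
      subst hc
      simp only [splitChain, List.take_zero, List.drop_succ_cons, List.drop_zero]
      cases hrec : splitChain rest with
      | nil => exact absurd hrec (splitChain_ne_nil rest)
      | cons p ps => simp
    · rw [if_neg hc] at h
      have hge := PySem.Chars.neg_one_le_find rest ['.']
      by_cases h0 : PySem.Chars.find rest ['.'] = -1
      · rw [if_pos h0] at h
        omega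
      · rw [if_neg h0] at h
        have hm : PySem.Chars.find rest ['.'] = ((n - 1 : Nat) : Int) := by omega
        have hn1 : 1 ≤ n := by omega
        have ihr := ih (n - 1) hm
        simp only [splitChain]
        rw [ihr]
        have h1 : n - 1 + 1 = n := by omega
        rw [h1]
        simp only [hc, if_false]
        have h2 : (c :: rest).take n = c :: rest.take (n - 1) := by
          cases n with
          | zero => omega
          | succ m => simp
        have h3 : (c :: rest).drop (n + 1) = rest.drop n := by
          cases n with
          | zero => omega
          | succ m => simp
        rw [h2, h3]

theorem join_splitChain (cs : List Char) :
    PySem.Chars.join ['.'] (splitChain cs) = cs := by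
  induction cs with
  | nil => simp [splitChain, PySem.Chars.join_singleton]
  | cons c rest ih =>
    simp only [splitChain]
    cases hrec : splitChain rest with
    | nil => exact absurd hrec (splitChain_ne_nil rest)
    | cons p ps =>
      rw [hrec] at ih
      dsimp only
      by_cases hc : c = '.'
      · subst hc
        rw [if_pos rfl, PySem.Chars.join_cons_cons, ih]
        simp
      · simp only [hc, if_false]
        cases ps with
        | nil =>
          rw [PySem.Chars.join_singleton] at ih ⊢
          rw [ih]
        | cons q qs =>
          rw [PySem.Chars.join_cons_cons] at ih ⊢
          rw [← ih]
          simp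

-- the joined tails of the parts list, head first
def tailsJoin : List String → List String
  | [] => []
  | p :: ps => PySem.Str.join "." (p :: ps) :: tailsJoin ps

theorem foldl_app {α β : Type} (f : α → β) (l : List α) (acc : List β) :
    l.foldl (fun a i => a ++ [f i]) acc = acc ++ l.map f := by
  induction l generalizing acc with
  | nil => simp
  | cons x xs ih => simp [ih]

theorem pyRange_zero_nat (n : Nat) :
    PySem.List.pyRange 0 (n : Int) 1 = (List.range n).map (fun i : Nat => (i : Int)) := by
  simp only [PySem.List.pyRange]
  rw [if_neg (by norm_num : ¬(1:Int) = 0)]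
  cases n with
  | zero => simp
  | succ m =>
    rw [if_pos (by norm_num : (0:Int) < 1), if_pos (by positivity : (0:Int) < ((m+1 : Nat) : Int))]
    have h2 : (((m+1 : Nat) : Int) - 0 + 1 - 1) / 1 = ((m+1 : Nat) : Int) := by omega
    rw [h2, Int.toNat_natCast]
    apply List.map_congr_left
    intro a _
    ring

theorem map_range_join (parts : List String) :
    (List.range parts.length).map (fun i => PySem.Str.join "." (parts.drop i)) =
      tailsJoin parts := by
  induction parts with
  | nil => simp [tailsJoin]
  | cons p ps ih =>
    simp only [List.length_cons, List.range_succ_eq_map, List.map_cons, List.map_map,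
      List.drop_zero, tailsJoin]
    congr 1

theorem variants_eq (s : String) :
    get_hostname_variants s = tailsJoin ((splitChain s.toList).map String.ofList) := by
  simp only [get_hostname_variants]
  rw [show (".".toList) = ['.'] from rfl, splitOn_eq, foldl_app, pyRange_zero_nat,
    List.map_map]
  rw [← map_range_join ((splitChain s.toList).map String.ofList)]
  simp only [List.nil_append]
  apply List.map_congr_left
  intro i hi
  simp only [Function.comp]
  rw [PySem.List.slice_from_natCast]

theorem join_parts (cs : List Char) :
    PySem.Str.join "." ((splitChain cs).map String.ofList) = String.ofList cs := by
  have h : (PySem.Str.join "." ((splitChain cs).map String.ofList)).toList = cs := by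
    rw [PySem.Str.toList_join, List.map_map]
    have : (String.toList ∘ String.ofList) = id := by
      funext l; simp [Function.comp, String.toList_ofList]
    rw [this, List.map_id]
    rw [show (".".toList) = ['.'] from rfl]
    exact join_splitChain cs
  rw [← String.ofList_toList (s := PySem.Str.join "." ((splitChain cs).map String.ofList)), h]

set_option maxHeartbeats 1000000 in
theorem tailsJoin_chain (s : String) :
    tailsJoin ((splitChain s.toList).map String.ofList) = suffixChain s := by
  induction s using suffixChain.induct with
  | case1 s ihf =>
    by_cases h : PySem.Str.find s "." = -1
    case pos =>
     have hchar : PySem.Chars.find s.toList ['.'] = -1 := by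
       rw [PySem.Str.find_eq] at h
       simpa using h
     rw [splitChain_no_dot s.toList hchar, suffixChain, dif_pos h]
     simp only [List.map_cons, List.map_nil, tailsJoin, String.ofList_toList]
     congr 1
     have h2 : (PySem.Str.join "." [s]).toList = s.toList := by
       rw [PySem.Str.toList_join]
       simp [PySem.Chars.join_singleton]
     rw [← String.ofList_toList (s := PySem.Str.join "." [s]), h2, String.ofList_toList]
    case neg =>
    have ih := ihf h
    have hpos : 0 ≤ PySem.Str.find s "." := by
      have hle := PySem.Chars.neg_one_le_find s.toList ".".toList
      rw [PySem.Str.find_eq] at h ⊢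
      omega
    have hchar : PySem.Chars.find s.toList ['.'] = (((PySem.Str.find s ".").toNat : Nat) : Int) := by
      rw [Int.toNat_of_nonneg hpos, PySem.Str.find_eq]
      simp only [show (".".toList) = ['.'] from rfl]
    have hdrop : (PySem.Str.slice s (some (PySem.Str.find s "." + 1)) none).toList
        = s.toList.drop ((PySem.Str.find s ".").toNat + 1) := by
      have hspec := (PySem.Chars.find_spec (s := s.toList) (sub := ['.'])
        (by rw [hchar]; positivity)).1
      have hlt : (PySem.Chars.find s.toList ['.']).toNat < s.toList.length := by
        rcases hspec with ⟨r, hr⟩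
        have hlen := congrArg List.length hr
        simp only [List.length_append, List.length_drop, List.length_cons,
          List.length_nil] at hlen
        omega
      rw [PySem.Str.toList_slice, PySem.Chars.slice_eq_listSlice, PySem.List.slice_some_none]
      congr 1
      simp only [PySem.List.clampIdx]
      split
      · omega
      · rw [hchar, Int.toNat_natCast] at hlt
        omega
    have hhead : PySem.Str.join "." ((splitChain s.toList).map String.ofList) = s := by
      rw [join_parts, String.ofList_toList]
    have hsc := splitChain_dot s.toList (PySem.Str.find s ".").toNat hchar
    rw [hsc] at hhead
    simp only [List.map_cons] at hhead
    rw [hdrop] at ih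
    rw [hsc]
    simp only [List.map_cons, tailsJoin]
    rw [suffixChain, dif_neg h, ih, hhead]

theorem variants_chain (s : String) : get_hostname_variants s = suffixChain s := by
  rw [variants_eq, tailsJoin_chain]

theorem loop_eq (included excluded : List String) (current : String) (found : Bool) :
    domain_matches_loop included excluded current found =
      (if (suffixChain current).any (fun v => excluded.contains v) then false
       else if included.isEmpty then true
       else found || (suffixChain current).any (fun v => included.contains v)) := by
  induction current using suffixChain.induct generalizing found with
  | case1 s ihf =>
    rw [domain_matches_loop, suffixChain]
    by_cases h : PySem.Str.find s "." = -1
    · rw [dif_pos h, dif_pos h]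
      cases hS : excluded.contains s <;>
        cases hI : included.isEmpty <;>
          simp_all
    · rw [dif_neg h, dif_neg h]
      rw [ihf h]
      cases hS : excluded.contains s <;>
        cases hI : included.isEmpty <;>
          simp_all [Bool.or_assoc]

-- ===== VERDICT (by name: the statement is the Claim_ definition above) =====
theorem domain_matches_py_spec : Claim_equal_domain_matches_py := by
  intro hostname included excluded _
  unfold Spec_domain_matches_py domain_matches_py domain_matches_py_alt
  simp only [variants_chain, loop_eq]
  simp
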